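-- pv_equiv track=rewrite | github.com/MarcSerraPeralta/surface-sim | surface_sim/setups/setup.py | _get_var_params
-- ===== SOURCE A (Python) =====
-- def _get_var_params(string: str) -> list[str]:
--     params: list[str] = []
--     for s in string.split("{")[1:]:
--         if "}" not in s:
--             raise ValueError(
--                 "Only one level of brakets is allowed. Ensure that brakets are matched."
--             )
--
--         param = s.split("}")[0]
--         if param == "":
--             raise ValueError("Params must be non-empty strings.")
--         params.append(param)
--
--     return params
-- ===== SOURCE B (Python) =====
-- def _get_var_params(string: str) -> list[str]:
--     # single-pass state machine: name is None outside braces, else the name collected so far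
--     params: list[str] = []
--     name = None
--     for ch in string:
--         if name is None:
--             if ch == "{":
--                 name = ""
--         elif ch == "}":
--             if name == "":
--                 raise ValueError("Params must be non-empty strings.")
--             params.append(name)
--             name = None
--         elif ch == "{":
--             raise ValueError(
--                 "Only one level of brakets is allowed. Ensure that brakets are matched."
--             )
--         else:
--             name += ch
--     if name is not None:
--         raise ValueError(
--             "Only one level of brakets is allowed. Ensure that brakets are matched."
--         )
--     return params
-- ===== Notes on version B (the rewrite author's own statement) =====
-- stated objective: alternative
-- what changed: Replaced the split-on-'{' segment loop (which builds intermediate segment lists and re-splits each segment on '}' with a substring membership test) by a single char-by-char state machine carrying an inside-braces name accumulator.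
import Mathlib
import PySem

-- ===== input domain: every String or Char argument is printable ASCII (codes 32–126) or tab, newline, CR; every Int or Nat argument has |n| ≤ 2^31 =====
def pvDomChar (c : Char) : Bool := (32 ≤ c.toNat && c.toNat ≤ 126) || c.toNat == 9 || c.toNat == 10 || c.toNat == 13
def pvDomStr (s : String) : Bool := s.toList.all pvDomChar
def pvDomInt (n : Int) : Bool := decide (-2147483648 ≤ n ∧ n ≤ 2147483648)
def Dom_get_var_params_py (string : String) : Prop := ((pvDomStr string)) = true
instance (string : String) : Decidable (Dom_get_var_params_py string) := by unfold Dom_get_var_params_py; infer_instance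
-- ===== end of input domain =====

-- B replaces A's split-on-'{' segment loop by a one-pass state machine; same values, raises excluded by Pre_.

-- ===== PORT A =====
-- the for-loop of A; `none` marks the two `raise ValueError` statements
def pvAParams : List (List Char) → List (List Char) → Option (List (List Char))
  | [], params => some params
  | s :: rest, params =>
    if PySem.Chars.isIn ['}'] s = false then none      -- if "}" not in s: raise
    else
      -- s.split("}")[0]; splitOn never returns [], so [0] is its head
      let param := (PySem.Chars.splitOn s ['}']).headD []
      if param = [] then none                           -- if param == "": raise
      else pvAParams rest (params ++ [param])

-- string.split("{")[1:] then the loop; sep "{" is nonempty so split = Chars.splitOn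
def get_var_params_py (string : String) : List String :=
  ((pvAParams (PySem.List.slice (PySem.Chars.splitOn string.toList ['{']) (some 1) none) []).getD []).map
    (fun cs => String.ofList cs)

-- ===== PORT B =====
-- Source B's state machine: second argument = `name` (none = outside braces); `none` result = raise
def pvBGo : List Char → Option (List Char) → List (List Char) → Option (List (List Char))
  | [], none, params => some params
  | [], some _, _ => none                               -- unclosed brace at end of string: raise
  | c :: rest, none, params =>
    if c = '{' then pvBGo rest (some []) params else pvBGo rest none params
  | c :: rest, some name, params =>
    if c = '}' then
      if name = [] then none                            -- empty param: raise
      else pvBGo rest none (params ++ [name])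
    else if c = '{' then none                           -- nested '{': raise
    else pvBGo rest (some (name ++ [c])) params

def get_var_params_py_alt (string : String) : List String :=
  ((pvBGo string.toList none []).getD []).map (fun cs => String.ofList cs)

-- ===== PRECONDITION & SPEC =====
-- Pre_ excludes exactly the inputs on which A raises ValueError: an opening brace that is not
-- closed before the next opening brace (or before the end of the string), or an opening brace
-- closed immediately (an empty param).
def Pre_get_var_params_py (string : String) : Prop :=
  ∀ i ∈ List.range string.toList.length, string.toList[i]? = some '{' →
    string.toList[i+1]? ≠ some '}' ∧
    ∃ j ∈ List.range string.toList.length, i < j ∧ string.toList[j]? = some '}' ∧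
      ∀ k ∈ List.range j, i < k → string.toList[k]? ≠ some '{'
instance (string : String) : Decidable (Pre_get_var_params_py string) := by
  unfold Pre_get_var_params_py; infer_instance

def pvWitness_get_var_params_py : String := "ab{cd}e{f}"

def Spec_get_var_params_py (string : String) (out : List String) : Prop := out = get_var_params_py_alt string
instance (string : String) (out : List String) : Decidable (Spec_get_var_params_py string out) := by unfold Spec_get_var_params_py; infer_instance

-- ===== CLAIM (what is proved, stated in full; the proofs are below) =====
def Claim_equal_get_var_params_py : Prop := ∀ (string : String), Dom_get_var_params_py string → Pre_get_var_params_py string → Spec_get_var_params_py string (get_var_params_py string)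

-- ===== LEMMAS AND PROOFS =====

-- prepend to the head of a (nonempty) list of segments
def pvConsHead (x : List Char) : List (List Char) → List (List Char)
  | [] => [x]
  | h :: t => (x ++ h) :: t

-- structural characterisation of Python split on a single-char separator
def pvSplit1 (sep : Char) : List Char → List (List Char)
  | [] => [[]]
  | c :: rest => if c = sep then [] :: pvSplit1 sep rest else pvConsHead [c] (pvSplit1 sep rest)

theorem pvSplit1_ne_nil (sep : Char) (l : List Char) : pvSplit1 sep l ≠ [] := by
  cases l with
  | nil => simp [pvSplit1]
  | cons c rest =>
    simp only [pvSplit1]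
    split
    · simp
    · cases h : pvSplit1 sep rest <;> simp [pvConsHead]

theorem pvSplitOn_go_spec (sep : Char) :
    ∀ fuel l cur acc, l.length < fuel →
      PySem.Chars.splitOn.go [sep] fuel l cur acc = acc.reverse ++ pvConsHead cur.reverse (pvSplit1 sep l) := by
  intro fuel
  induction fuel with
  | zero => intro l cur acc h; omega
  | succ f ih =>
    intro l cur acc h
    cases l with
    | nil => simp [PySem.Chars.splitOn.go, pvSplit1, pvConsHead]
    | cons c rest =>
      rw [PySem.Chars.splitOn.go]
      by_cases hc : c = sep
      · subst hc
        simp only [List.isPrefixOf, BEq.rfl, Bool.true_and, if_pos]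
        rw [show List.drop [c].length (c :: rest) = rest from by simp,
          ih rest [] (cur.reverse :: acc) (by simpa using Nat.lt_of_succ_lt_succ h)]
        cases hs : pvSplit1 c rest with
        | nil => exact absurd hs (pvSplit1_ne_nil c rest)
        | cons h0 t0 => simp [pvSplit1, pvConsHead, hs]
      · have : ([sep].isPrefixOf (c :: rest)) = false := by
          simp [List.isPrefixOf]
          exact fun hh => absurd hh.symm hc
        rw [this]
        simp only [Bool.false_eq_true, if_false]
        rw [ih rest (c :: cur) acc (by simpa using Nat.lt_of_succ_lt_succ h)]
        cases hs : pvSplit1 sep rest with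
        | nil => exact absurd hs (pvSplit1_ne_nil sep rest)
        | cons h0 t0 => simp [pvSplit1, pvConsHead, hs, hc]

theorem pvSplitOn_eq (sep : Char) (l : List Char) :
    PySem.Chars.splitOn l [sep] = pvSplit1 sep l := by
  rw [PySem.Chars.splitOn, pvSplitOn_go_spec sep (l.length + 1) l [] [] (by omega)]
  cases hs : pvSplit1 sep l with
  | nil => exact absurd hs (pvSplit1_ne_nil sep l)
  | cons h0 t0 => simp [pvConsHead]

theorem pvIsIn_singleton (a : Char) (l : List Char) :
    PySem.Chars.isIn [a] l = true ↔ a ∈ l := by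
  rw [PySem.Chars.isIn_iff_infix]
  constructor
  · rintro ⟨p, q, rfl⟩
    simp
  · intro h
    obtain ⟨p, q, rfl⟩ := List.append_of_mem h
    exact ⟨p, q, by simp⟩

-- first segment of split on sep of (name ++ sep :: ys) is name, when sep ∉ name
theorem pvSplit1_headD_append (sep : Char) (name ys : List Char) (h : sep ∉ name) :
    (pvSplit1 sep (name ++ sep :: ys)).headD [] = name := by
  induction name with
  | nil => simp [pvSplit1]
  | cons c rest ih =>
    have hc : c ≠ sep := fun hh => h (hh ▸ List.mem_cons_self)
    have hrest : sep ∉ rest := fun hh => h (List.mem_cons_of_mem _ hh)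
    simp only [List.cons_append, pvSplit1, hc, if_false]
    cases hs : pvSplit1 sep (rest ++ sep :: ys) with
    | nil => exact absurd hs (pvSplit1_ne_nil sep _)
    | cons h0 t0 =>
      have := ih hrest
      rw [hs] at this
      simp only [List.headD_cons] at this
      simp [pvConsHead, this]

-- the main correspondence, both states at once
theorem pvMain : ∀ cs : List Char,
    (∀ params, pvBGo cs none params = pvAParams ((pvSplit1 '{' cs).drop 1) params) ∧
    (∀ name params, '}' ∉ name → '{' ∉ name →
      pvBGo cs (some name) params = pvAParams (pvConsHead name (pvSplit1 '{' cs)) params) := by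
  intro cs
  induction cs with
  | nil =>
    constructor
    · intro params; simp [pvBGo, pvSplit1, pvAParams]
    · intro name params h1 _
      have : PySem.Chars.isIn ['}'] name = false := by
        rw [Bool.eq_false_iff]; intro hh; exact h1 ((pvIsIn_singleton '}' name).mp hh)
      simp [pvBGo, pvSplit1, pvConsHead, pvAParams, this]
  | cons c rest ih =>
    obtain ⟨ih1, ih2⟩ := ih
    constructor
    · intro params
      by_cases hc : c = '{'
      · subst hc
        simp only [pvBGo, pvSplit1]
        rw [ih2 [] params (by simp) (by simp)]
        cases hs : pvSplit1 '{' rest with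
        | nil => exact absurd hs (pvSplit1_ne_nil _ _)
        | cons h0 t0 => simp [pvConsHead]
      · simp only [pvBGo, pvSplit1, if_neg hc]
        rw [ih1 params]
        cases hs : pvSplit1 '{' rest with
        | nil => exact absurd hs (pvSplit1_ne_nil _ _)
        | cons h0 t0 => simp [pvConsHead]
    · intro name params h1 h2
      by_cases hcr : c = '}'
      · subst hcr
        have hco : ('}' : Char) ≠ '{' := by decide
        simp only [pvBGo, pvSplit1, if_neg hco]
        cases hs : pvSplit1 '{' rest with
        | nil => exact absurd hs (pvSplit1_ne_nil _ _)
        | cons h0 t0 =>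
          have hmem : PySem.Chars.isIn ['}'] (name ++ '}' :: h0) = true :=
            (pvIsIn_singleton _ _).mpr (by simp)
          simp only [pvConsHead, List.cons_append, List.nil_append, pvAParams, hmem,
            Bool.true_eq_false, if_false, if_true]
          rw [pvSplitOn_eq '}' (name ++ '}' :: h0), pvSplit1_headD_append '}' name h0 h1]
          by_cases hn : name = []
          · simp [hn]
          · simp only [if_neg hn]
            rw [ih1 (params ++ [name]), hs]
            simp
      · by_cases hc : c = '{'
        · subst hc
          have : PySem.Chars.isIn ['}'] name = false := by
            rw [Bool.eq_false_iff]; intro hh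
            exact h1 ((pvIsIn_singleton '}' name).mp hh)
          simp [pvBGo, hcr, pvSplit1, pvConsHead, pvAParams, this]
        · simp only [pvBGo, if_neg hcr, pvSplit1, if_neg hc]
          rw [ih2 (name ++ [c]) params (by simp [h1, Ne.symm hcr]) (by simp [h2, Ne.symm hc])]
          cases hs : pvSplit1 '{' rest with
          | nil => exact absurd hs (pvSplit1_ne_nil _ _)
          | cons h0 t0 => simp [pvConsHead]

-- ===== VERDICT (by name: the statement is the Claim_ definition above) =====
theorem get_var_params_py_spec : Claim_equal_get_var_params_py := by
  intro string _ _
  unfold Spec_get_var_params_py get_var_params_py get_var_params_py_alt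
  rw [pvSplitOn_eq '{' string.toList, PySem.List.slice_from_one, (pvMain string.toList).1 []]
  cases hs : pvSplit1 '{' string.toList with
  | nil => exact absurd hs (pvSplit1_ne_nil _ _)
  | cons h0 t0 => simp
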